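-- pv_equiv track=rewrite | github.com/warmo1/eonha | custom_components/eonha/coordinator.py | _merge_consumption
-- ===== SOURCE A (Python) =====
-- def _merge_consumption(old: list[dict], new: list[dict]) -> list[dict]:
--     """Merge new consumption records into existing ones, deduplicating by startAt."""
--     seen = {}
--     for rec in old:
--         seen[rec["startAt"]] = rec
--     for rec in new:
--         seen[rec["startAt"]] = rec
--     merged = sorted(seen.values(), key=lambda x: x["startAt"])
--     return merged
-- ===== SOURCE B (Python) =====
-- def _merge_consumption(old: list[dict], new: list[dict]) -> list[dict]:
--     """Merge new consumption records into existing ones, deduplicating by startAt."""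
--     combined = sorted(old + new, key=lambda r: r["startAt"])
--     n = len(combined)
--     merged = []
--     for i, rec in enumerate(combined):
--         if i + 1 == n or combined[i + 1]["startAt"] != rec["startAt"]:
--             merged.append(rec)
--     return merged
-- ===== Notes on version B (the rewrite author's own statement) =====
-- stated objective: alternative
-- what changed: Replaces the dict-index-then-sort-values pass by concatenating old+new, stably sorting by startAt, and one linear sweep keeping the last record of each equal-startAt run (stability makes that the dict's last-write-wins record).
import Mathlib
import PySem

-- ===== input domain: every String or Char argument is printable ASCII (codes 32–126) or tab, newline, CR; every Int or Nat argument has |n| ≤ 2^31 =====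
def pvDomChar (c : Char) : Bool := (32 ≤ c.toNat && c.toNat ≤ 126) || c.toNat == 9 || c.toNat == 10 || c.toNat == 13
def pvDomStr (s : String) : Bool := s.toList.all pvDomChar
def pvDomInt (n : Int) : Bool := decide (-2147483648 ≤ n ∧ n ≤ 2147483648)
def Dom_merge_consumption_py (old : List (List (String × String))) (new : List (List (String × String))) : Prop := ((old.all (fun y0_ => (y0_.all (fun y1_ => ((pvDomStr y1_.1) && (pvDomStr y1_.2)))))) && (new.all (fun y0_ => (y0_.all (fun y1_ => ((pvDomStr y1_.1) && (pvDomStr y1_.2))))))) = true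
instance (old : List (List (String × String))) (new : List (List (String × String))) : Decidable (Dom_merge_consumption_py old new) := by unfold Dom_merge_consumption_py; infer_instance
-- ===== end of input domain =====

-- B replaces A's dict-index-then-sort-values by stably sorting old++new by startAt and keeping
-- the last record of each equal-startAt run (stability gives the dict's last-write-wins); alternative decomposition, same asymptotic cost.


-- ===== PORT A =====
-- rec["startAt"] (both Pythons do this lookup); KeyError (= contains false) is excluded by Pre_,
-- the "" default is never reached inside Pre_.
def pvStart (rec : List (String × String)) : String := (PySem.Dict.mk rec).getD "startAt" ""

def merge_consumption_py (old : List (List (String × String))) (new : List (List (String × String))) : List (List (String × String)) :=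
  let seen := old.foldl (fun d rec => d.insert (pvStart rec) rec) PySem.Dict.empty
  let seen := new.foldl (fun d rec => d.insert (pvStart rec) rec) seen
  PySem.List.sorted seen.values pvStart

-- ===== PORT B =====
-- the enumerate-with-lookahead loop of Source B: emit rec iff it is last or the next startAt differs
def pvKeepLast : List (List (String × String)) → List (List (String × String))
  | [] => []
  | [x] => [x]
  | x :: y :: t => if pvStart x == pvStart y then pvKeepLast (y :: t) else x :: pvKeepLast (y :: t)

def merge_consumption_py_alt (old : List (List (String × String))) (new : List (List (String × String))) : List (List (String × String)) :=
  pvKeepLast (PySem.List.sorted (old ++ new) pvStart)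

-- ===== PRECONDITION & SPEC =====
-- Pre_ excludes exactly the inputs where some record lacks the "startAt" key, on which A (and B) raise KeyError.
def Pre_merge_consumption_py (old : List (List (String × String))) (new : List (List (String × String))) : Prop :=
  ((old ++ new).all (fun rec => (PySem.Dict.mk rec).contains "startAt")) = true
instance (old : List (List (String × String))) (new : List (List (String × String))) : Decidable (Pre_merge_consumption_py old new) := by unfold Pre_merge_consumption_py; infer_instance

def pvWitness_merge_consumption_py : (List (List (String × String))) × (List (List (String × String))) :=
  ([[("startAt", "2025-01-01"), ("consumption", "5")]], [[("startAt", "2025-01-02"), ("consumption", "7")]])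

def Spec_merge_consumption_py (old : List (List (String × String))) (new : List (List (String × String))) (out : List (List (String × String))) : Prop := out = merge_consumption_py_alt old new
instance (old : List (List (String × String))) (new : List (List (String × String))) (out : List (List (String × String))) : Decidable (Spec_merge_consumption_py old new out) := by unfold Spec_merge_consumption_py; infer_instance

-- ===== CLAIM (what is proved, stated in full; the proofs are below) =====
def Claim_equal_merge_consumption_py : Prop := ∀ (old : List (List (String × String))) (new : List (List (String × String))), Dom_merge_consumption_py old new → Pre_merge_consumption_py old new → Spec_merge_consumption_py old new (merge_consumption_py old new)

-- ===== LEMMAS AND PROOFS =====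

lemma mem_pvKeepLast {w : List (String × String)} {s : List (List (String × String))} (h : w ∈ pvKeepLast s) : w ∈ s := by
  fun_induction pvKeepLast s with
  | case1 => simp at h
  | case2 x => simpa using h
  | case3 x z t hxz ih =>
      exact List.mem_cons_of_mem _ (ih h)
  | case4 x z t hxz ih =>
      rcases List.mem_cons.mp h with h1 | h2
      · simp [h1]
      · exact List.mem_cons_of_mem _ (ih h2)

lemma pvKeepLast_pairwise_lt (s : List (List (String × String)))
    (h : s.Pairwise (fun a b => pvStart a ≤ pvStart b)) :
    (pvKeepLast s).Pairwise (fun a b => pvStart a < pvStart b) := by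
  fun_induction pvKeepLast s with
  | case1 => simp
  | case2 x => simp
  | case3 x z t hxz ih => exact ih (List.pairwise_cons.mp h).2
  | case4 x z t hxz ih =>
      rcases List.pairwise_cons.mp h with ⟨hx, ht⟩
      refine List.pairwise_cons.mpr ⟨?_, ih ht⟩
      intro w hw
      have hwzt : w ∈ z :: t := mem_pvKeepLast hw
      have hxz' : pvStart x < pvStart z := by
        have hle : pvStart x ≤ pvStart z := hx z (by simp)
        have hne : pvStart x ≠ pvStart z := by simpa using hxz
        exact lt_of_le_of_ne hle hne
      rcases List.mem_cons.mp hwzt with h1 | h2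
      · simpa [h1] using hxz'
      · exact lt_of_lt_of_le hxz' ((List.pairwise_cons.mp ht).1 w h2)

-- inserting into a sorted run: keepLast of the insertion is r plus keepLast minus r's key
lemma pvKeepLast_insertBy_perm (r : List (String × String)) (s : List (List (String × String)))
    (hs : s.Pairwise (fun a b => pvStart a ≤ pvStart b)) :
    (pvKeepLast (PySem.List.insertBy (fun a b => decide (pvStart a < pvStart b)) r s)).Perm
      (r :: (pvKeepLast s).filter (fun y => !(pvStart y == pvStart r))) := by
  induction s with
  | nil => simp [PySem.List.insertBy, pvKeepLast]
  | cons y ys ih =>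
    rcases List.pairwise_cons.mp hs with ⟨hy, hys⟩
    by_cases hbry : pvStart r < pvStart y
    · have h1 : PySem.List.insertBy (fun a b => decide (pvStart a < pvStart b)) r (y :: ys)
          = r :: y :: ys := by simp [PySem.List.insertBy, hbry]
      have hne : (pvStart r == pvStart y) = false := by simp [ne_of_lt hbry]
      have hfe : (pvKeepLast (y :: ys)).filter (fun w => !(pvStart w == pvStart r)) = pvKeepLast (y :: ys) := by
        apply List.filter_eq_self.mpr
        intro w hw
        rcases List.mem_cons.mp (mem_pvKeepLast hw) with h2 | h3
        · simp [h2]; exact (ne_of_lt hbry).symm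
        · have : pvStart y ≤ pvStart w := hy w h3
          simp; exact (ne_of_lt (lt_of_lt_of_le hbry this)).symm
      rw [h1, hfe]
      cases ys with
      | nil => simp [pvKeepLast, hne]
      | cons z zs =>
        simp only [pvKeepLast, hne, Bool.false_eq_true, if_false]
        exact List.Perm.refl _
    · have h1 : PySem.List.insertBy (fun a b => decide (pvStart a < pvStart b)) r (y :: ys)
          = y :: PySem.List.insertBy (fun a b => decide (pvStart a < pvStart b)) r ys := by
        simp [PySem.List.insertBy, hbry]
      have hyr_le : pvStart y ≤ pvStart r := le_of_not_gt hbry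
      rw [h1]
      cases ys with
      | nil =>
        by_cases hyr : pvStart y = pvStart r
        · simp [PySem.List.insertBy, pvKeepLast, hyr]
        · simp only [PySem.List.insertBy, pvKeepLast, beq_iff_eq, hyr, if_false,
            List.filter_cons, Bool.not_eq_true', beq_eq_false_iff_ne, ne_eq,
            not_false_eq_true, if_true, List.filter_nil]
          exact List.Perm.swap r y []
      | cons z zs =>
        rcases List.pairwise_cons.mp hys with ⟨hz, hzs⟩
        by_cases hbrz : pvStart r < pvStart z
        · have h2 : PySem.List.insertBy (fun a b => decide (pvStart a < pvStart b)) r (z :: zs)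
              = r :: z :: zs := by simp [PySem.List.insertBy, hbrz]
          have hrz : (pvStart r == pvStart z) = false := by simp [ne_of_lt hbrz]
          have hfe : (pvKeepLast (z :: zs)).filter (fun w => !(pvStart w == pvStart r)) = pvKeepLast (z :: zs) := by
            apply List.filter_eq_self.mpr
            intro w hw
            rcases List.mem_cons.mp (mem_pvKeepLast hw) with h3 | h4
            · simp [h3]; exact (ne_of_lt hbrz).symm
            · have : pvStart z ≤ pvStart w := hz w h4
              simp; exact (ne_of_lt (lt_of_lt_of_le hbrz this)).symm
          have hyz : pvStart y ≠ pvStart z := by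
            intro he
            have : pvStart y ≤ pvStart r := hyr_le
            have h5 : pvStart r < pvStart y := he ▸ hbrz
            exact absurd this (not_le_of_gt h5)
          rw [h2]
          have hR' : pvKeepLast (y :: z :: zs) = y :: pvKeepLast (z :: zs) := by
            simp [pvKeepLast, hyz]
          by_cases hyr : pvStart y = pvStart r
          · have hL : pvKeepLast (y :: r :: z :: zs) = r :: pvKeepLast (z :: zs) := by
              simp [pvKeepLast, hyr, hrz]
            have hf : (y :: pvKeepLast (z :: zs)).filter (fun w => !(pvStart w == pvStart r)) = pvKeepLast (z :: zs) := by
              rw [List.filter_cons]; simp [hyr, hfe]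
            rw [hL, hR', hf]
          · have hL : pvKeepLast (y :: r :: z :: zs) = y :: r :: pvKeepLast (z :: zs) := by
              simp [pvKeepLast, hyr, hrz]
            have hf : (y :: pvKeepLast (z :: zs)).filter (fun w => !(pvStart w == pvStart r)) = y :: pvKeepLast (z :: zs) := by
              rw [List.filter_cons]; simp [hyr, hfe]
            rw [hL, hR', hf]
            exact List.Perm.swap r y _
        · have h2 : PySem.List.insertBy (fun a b => decide (pvStart a < pvStart b)) r (z :: zs)
              = z :: PySem.List.insertBy (fun a b => decide (pvStart a < pvStart b)) r zs := by
            simp [PySem.List.insertBy, hbrz]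
          have hih := ih hys
          by_cases hyz : pvStart y = pvStart z
          · have hL : pvKeepLast (y :: PySem.List.insertBy (fun a b => decide (pvStart a < pvStart b)) r (z :: zs))
                = pvKeepLast (PySem.List.insertBy (fun a b => decide (pvStart a < pvStart b)) r (z :: zs)) := by
              rw [h2]; simp [pvKeepLast, hyz]
            have hR : pvKeepLast (y :: z :: zs) = pvKeepLast (z :: zs) := by simp [pvKeepLast, hyz]
            rw [hL, hR]; exact hih
          · have hyr : pvStart y ≠ pvStart r := by
              intro he
              have hzr : pvStart z ≤ pvStart r := le_of_not_gt hbrz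
              have hyz' : pvStart y ≤ pvStart z := hy z (by simp)
              exact hyz (le_antisymm hyz' (he ▸ hzr))
            have hL : pvKeepLast (y :: PySem.List.insertBy (fun a b => decide (pvStart a < pvStart b)) r (z :: zs))
                = y :: pvKeepLast (PySem.List.insertBy (fun a b => decide (pvStart a < pvStart b)) r (z :: zs)) := by
              rw [h2]; simp [pvKeepLast, hyz]
            have hR : pvKeepLast (y :: z :: zs) = y :: pvKeepLast (z :: zs) := by simp [pvKeepLast, hyz]
            rw [hL, hR]
            have hfy : (y :: pvKeepLast (z :: zs)).filter (fun w => !(pvStart w == pvStart r))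
                = y :: (pvKeepLast (z :: zs)).filter (fun w => !(pvStart w == pvStart r)) := by
              simp [hyr]
            rw [hfy]
            exact (List.Perm.cons y hih).trans (List.Perm.swap r y _)

lemma pvItems_coherent (zs : List (List (String × String))) :
    ∀ (d : PySem.Dict String (List (String × String))),
    (∀ p ∈ d.items, p.1 = pvStart p.2) →
    ∀ p ∈ (zs.foldl (fun d rec => d.insert (pvStart rec) rec) d).items, p.1 = pvStart p.2 := by
  induction zs with
  | nil => intro d hd; simpa using hd
  | cons r t ih =>
    intro d hd
    simp only [List.foldl_cons]
    apply ih
    intro p hp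
    rcases (PySem.Dict.mem_items_insert ..).mp hp with h1 | h2
    · rw [h1]
    · exact hd p h2.1

lemma pvMapReplace_perm (v : List (String × String)) :
    ∀ (l : List (String × (List (String × String)))),
    (l.map (·.1)).Nodup → pvStart v ∈ l.map (·.1) → (∀ p ∈ l, p.1 = pvStart p.2) →
    ((l.map (fun p => if p.1 == pvStart v then (pvStart v, v) else p)).map (·.2)).Perm
      (v :: (l.map (·.2)).filter (fun y => !(pvStart y == pvStart v))) := by
  intro l
  induction l with
  | nil => intro _ hm _; simp at hm
  | cons p t ih =>
    intro hnd hm hcoh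
    by_cases hp1 : p.1 = pvStart v
    · have hrest : ∀ q ∈ t, ¬(q.1 = pvStart v) := by
        intro q hq he
        have : p.1 ∈ t.map (·.1) := by rw [hp1, ← he]; exact List.mem_map.mpr ⟨q, hq, rfl⟩
        exact (List.nodup_cons.mp hnd).1 this
      have hmapid : t.map (fun q => if q.1 == pvStart v then (pvStart v, v) else q) = t := by
        apply List.map_congr_left ?_ |>.trans (List.map_id t)
        intro q hq; simp [hrest q hq]
      have hfilt : (t.map (·.2)).filter (fun y => !(pvStart y == pvStart v)) = t.map (·.2) := by
        apply List.filter_eq_self.mpr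
        intro y hy
        rcases List.mem_map.mp hy with ⟨q, hq, hqy⟩
        have : pvStart y = q.1 := by rw [← hqy]; exact (hcoh q (List.mem_cons_of_mem _ hq)).symm
        simp [this, hrest q hq]
      simp only [List.map_cons, hp1, beq_self_eq_true, if_true, hmapid, List.filter_cons]
      have : (pvStart p.2 == pvStart v) = true := by
        rw [show pvStart p.2 = p.1 from (hcoh p (by simp)).symm, hp1]; simp
      simp [this, hfilt]
    · have hm' : pvStart v ∈ t.map (·.1) := by
        rcases List.mem_cons.mp hm with h1 | h2
        · exact absurd h1.symm hp1
        · exact h2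
      have hih := ih (List.nodup_cons.mp hnd).2 hm' (fun q hq => hcoh q (List.mem_cons_of_mem _ hq))
      have hkeep : (pvStart p.2 == pvStart v) = false := by
        rw [show pvStart p.2 = p.1 from (hcoh p (by simp)).symm]; simpa using hp1
      have hp1b : (p.1 == pvStart v) = false := by simpa using hp1
      simp only [List.map_cons, hp1b, Bool.false_eq_true, if_false, List.filter_cons, hkeep,
        Bool.not_false, if_true]
      exact (List.Perm.cons p.2 hih).trans (List.Perm.swap v p.2 _)

lemma pvValues_insert_perm (d : PySem.Dict String (List (String × String))) (v : List (String × String))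
    (hn : d.keys.Nodup) (hc : ∀ p ∈ d.items, p.1 = pvStart p.2) :
    ((d.insert (pvStart v) v).values).Perm (v :: d.values.filter (fun y => !(pvStart y == pvStart v))) := by
  by_cases hc2 : d.contains (pvStart v) = true
  · rw [show (d.insert (pvStart v) v).values
        = ((d.items.map (fun p => if p.1 == pvStart v then (pvStart v, v) else p)).map (·.2)) from by
      simp only [PySem.Dict.values, PySem.Dict.items_insert, hc2, if_true]]
    rw [show d.values = d.items.map (·.2) from rfl]
    have hmem : pvStart v ∈ d.items.map (·.1) := by
      have := (PySem.Dict.contains_iff_mem_keys ..).mp hc2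
      simpa [PySem.Dict.keys] using this
    have hnd : (d.items.map (·.1)).Nodup := by simpa [PySem.Dict.keys] using hn
    exact pvMapReplace_perm v d.items hnd hmem hc
  · rw [show (d.insert (pvStart v) v).values = d.values ++ [v] from by
      simp only [PySem.Dict.values, PySem.Dict.items_insert, hc2, Bool.false_eq_true, if_false,
        List.map_append, List.map_cons, List.map_nil]]
    have hfe : d.values.filter (fun y => !(pvStart y == pvStart v)) = d.values := by
      apply List.filter_eq_self.mpr
      intro y hy
      rcases List.mem_map.mp hy with ⟨p, hp, hpy⟩
      have h1 : p.1 = pvStart y := hpy ▸ hc p hp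
      have h2 : p.1 ∈ d.keys := by
        simp only [PySem.Dict.keys]; exact List.mem_map.mpr ⟨p, hp, rfl⟩
      have h3 : pvStart y ≠ pvStart v := by
        intro he
        exact hc2 ((PySem.Dict.contains_iff_mem_keys ..).mpr (by rw [← he, ← h1]; exact h2))
      simpa using h3
    rw [hfe]
    exact List.perm_append_singleton v d.values

lemma pvMain_perm (zs : List (List (String × String))) :
    (pvKeepLast (PySem.List.sorted zs pvStart)).Perm
      ((zs.foldl (fun d rec => d.insert (pvStart rec) rec) PySem.Dict.empty).values) := by
  induction zs using List.reverseRecOn with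
  | nil => exact List.Perm.refl _
  | append_singleton t r ih =>
    have hn : (t.foldl (fun d rec => d.insert (pvStart rec) rec) PySem.Dict.empty).keys.Nodup :=
      PySem.Dict.nodup_keys_foldl_insert_key t pvStart (fun _ rec => rec) PySem.Dict.empty
        (by simp [PySem.Dict.keys_empty])
    have hcoh := pvItems_coherent t PySem.Dict.empty (by intro p hp; simp [PySem.Dict.empty] at hp)
    have hfold : (t ++ [r]).foldl (fun d rec => d.insert (pvStart rec) rec) PySem.Dict.empty
        = ((t.foldl (fun d rec => d.insert (pvStart rec) rec) PySem.Dict.empty).insert (pvStart r) r) := by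
      rw [List.foldl_append]; rfl
    have hsort : PySem.List.sorted (t ++ [r]) pvStart
        = PySem.List.insertBy (fun a b => decide (pvStart a < pvStart b)) r (PySem.List.sorted t pvStart) := by
      rw [PySem.List.sorted_eq_foldl_insertBy, PySem.List.sorted_eq_foldl_insertBy, List.foldl_append]
      rfl
    rw [hfold, hsort]
    refine (pvKeepLast_insertBy_perm r _ (PySem.List.sorted_pairwise t pvStart)).trans ?_
    refine List.Perm.trans ?_ (pvValues_insert_perm _ r hn hcoh).symm
    exact List.Perm.cons r (ih.filter _)

-- ===== VERDICT (by name: the statement is the Claim_ definition above) =====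
theorem merge_consumption_py_spec : Claim_equal_merge_consumption_py := by
  intro old new _ _
  show merge_consumption_py old new = merge_consumption_py_alt old new
  show PySem.List.sorted (new.foldl (fun d rec => d.insert (pvStart rec) rec)
        (old.foldl (fun d rec => d.insert (pvStart rec) rec) PySem.Dict.empty)).values pvStart
      = pvKeepLast (PySem.List.sorted (old ++ new) pvStart)
  rw [show (new.foldl (fun d rec => d.insert (pvStart rec) rec)
        (old.foldl (fun d rec => d.insert (pvStart rec) rec) PySem.Dict.empty))
      = ((old ++ new).foldl (fun d rec => d.insert (pvStart rec) rec) PySem.Dict.empty)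
      from (List.foldl_append ..).symm]
  exact PySem.List.sorted_eq_of_perm_of_pairwise_lt _ _ _
    (pvMain_perm (old ++ new))
    (pvKeepLast_pairwise_lt _ (PySem.List.sorted_pairwise _ _))
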